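-- pv_equiv track=rewrite | github.com/GooLey1025/CEN_Tools | scripts/06.HOR/HORdetect.py | get_ClstrCnt
-- ===== SOURCE A (Python) =====
-- def get_ClstrCnt(clstr, seq):
--     # rotate the cycle string and get the rotate/cnt/index list #
--     clstr_rotate = [clstr[i:] + clstr[:i] for i in range(len(clstr))]
--     clstr_rotate = sorted(clstr_rotate)
--     clstr_cnt = []
--     index = []
--     for iclstr in clstr_rotate:
--         i = 0
--         clcnt = 0
--         clindex=[]
--         while True:
--             if i > len(seq):
--                 break
--             if seq[i:i+len(iclstr)] == iclstr:
--                 clcnt += 1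
--                 clindex.append(i)
--                 i = i+len(iclstr)
--             else:
--                 i += 1
--         # for i in range(len(seq) - len(iclstr)):
--         #     if seq[i:i+len(iclstr)] == iclstr:
--         #         clcnt += 1
--         #         clindex.append(i)
--         clstr_cnt.append(clcnt)
--         index.append(clindex)
--     return clstr_rotate, clstr_cnt, index
-- ===== SOURCE B (Python) =====
-- def get_ClstrCnt(clstr, seq):
--     # One pass over seq: bucket every window position by its word via a dict
--     # keyed by rotation, then greedily pick non-overlapping positions per rotation.
--     m = len(clstr)
--     rots = sorted(clstr[i:] + clstr[:i] for i in range(m))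
--     occ = {r: [] for r in rots}
--     for i in range(len(seq) - m + 1):
--         w = seq[i:i+m]
--         if w in occ:
--             occ[w].append(i)
--     cnts = []
--     idxs = []
--     for r in rots:
--         picked = []
--         nxt = 0
--         for p in occ[r]:
--             if p >= nxt:
--                 picked.append(p)
--                 nxt = p + m
--         cnts.append(len(picked))
--         idxs.append(picked)
--     return rots, cnts, idxs
-- ===== Notes on version B (the rewrite author's own statement) =====
-- stated objective: faster
-- what changed: Instead of re-scanning seq once per rotation with repeated slice comparisons, B slides over seq once, bucketing every window position into a dict keyed by rotation, then applies the greedy non-overlapping selection to each rotation's position list.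
import Mathlib
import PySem

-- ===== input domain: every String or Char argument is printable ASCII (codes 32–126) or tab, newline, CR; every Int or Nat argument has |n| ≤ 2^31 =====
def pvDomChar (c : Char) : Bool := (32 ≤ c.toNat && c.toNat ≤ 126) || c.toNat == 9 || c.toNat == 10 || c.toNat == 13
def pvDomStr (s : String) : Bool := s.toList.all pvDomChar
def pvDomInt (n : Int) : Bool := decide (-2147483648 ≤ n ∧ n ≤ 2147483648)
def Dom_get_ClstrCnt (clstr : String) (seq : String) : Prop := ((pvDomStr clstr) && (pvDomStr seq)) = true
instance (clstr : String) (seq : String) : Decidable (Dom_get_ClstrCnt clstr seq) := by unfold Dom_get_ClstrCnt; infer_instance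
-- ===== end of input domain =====

-- B replaces A's per-rotation rescan of seq by ONE pass over seq that buckets every
-- window position into a dict keyed by rotation, then greedily picks non-overlapping
-- positions per rotation (objective: faster).

-- ===== PORT A =====
-- sorted list of all rotations clstr[i:] + clstr[:i]
def pvRotsA (clstr : String) : List String :=
  PySem.List.sorted
    ((PySem.List.pyRange 0 (clstr.toList.length : Int)).map
      (fun i => String.ofList (PySem.List.slice clstr.toList (some i) none ++
                               PySem.List.slice clstr.toList none (some i))))
    (fun s => s) false

-- A's inner while loop: i walks seq, taking a match greedily and jumping len(pat);
-- fuel only makes the recursion structural (the loop runs at most len(seq)+2 times)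
def pvALoop (sl pat : List Char) : Nat → Int → Int → List Int → Int × List Int
  | 0, _, cnt, idx => (cnt, idx)
  | fuel+1, i, cnt, idx =>
    if (sl.length : Int) < i then (cnt, idx)
    else if PySem.List.slice sl (some i) (some (i + (pat.length : Int))) == pat then
      pvALoop sl pat fuel (i + (pat.length : Int)) (cnt + 1) (idx ++ [i])
    else pvALoop sl pat fuel (i + 1) cnt idx

def get_ClstrCnt (clstr : String) (seq : String) : List String × List Int × List (List Int) :=
  let rot := pvRotsA clstr
  let st := rot.foldl (fun (st : List Int × List (List Int)) ic =>
      let r := pvALoop seq.toList ic.toList (seq.toList.length + 2) 0 0 []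
      (st.1 ++ [r.1], st.2 ++ [r.2])) ([], [])
  (rot, st.1, st.2)

-- ===== PORT B =====
def pvRotsB (clstr : String) : List String :=
  PySem.List.sorted
    ((PySem.List.pyRange 0 (clstr.toList.length : Int)).map
      (fun i => String.ofList (PySem.List.slice clstr.toList (some i) none ++
                               PySem.List.slice clstr.toList none (some i))))
    (fun s => s) false

-- occ = {r: [] for r in rots}; for i in range(len(seq)-m+1): if seq[i:i+m] in occ: append i
def pvOccDict (sl : List Char) (m : Int) (rots : List String) : PySem.Dict (List Char) (List Int) :=
  let d0 := rots.foldl (fun d r => d.insert r.toList ([] : List Int)) PySem.Dict.empty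
  (PySem.List.pyRange 0 ((sl.length : Int) - m + 1)).foldl
    (fun d i =>
      let w := PySem.List.slice sl (some i) (some (i + m))
      if d.contains w then d.modify w [] (fun v => v ++ [i]) else d) d0

-- greedy non-overlapping selection from the occurrence list
def pvGreedy (m : Int) (occ : List Int) : List Int :=
  (occ.foldl (fun (st : List Int × Int) p => if st.2 ≤ p then (st.1 ++ [p], p + m) else st)
    (([] : List Int), (0 : Int))).1

def get_ClstrCnt_alt (clstr : String) (seq : String) : List String × List Int × List (List Int) :=
  let m : Int := (clstr.toList.length : Int)
  let rot := pvRotsB clstr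
  let d := pvOccDict seq.toList m rot
  let st := rot.foldl (fun (st : List Int × List (List Int)) r =>
      let picked := pvGreedy m (d.getD r.toList [])
      (st.1 ++ [(picked.length : Int)], st.2 ++ [picked])) ([], [])
  (rot, st.1, st.2)

-- ===== PRECONDITION & SPEC =====
def Spec_get_ClstrCnt (clstr : String) (seq : String) (out : List String × List Int × List (List Int)) : Prop := out = get_ClstrCnt_alt clstr seq
instance (clstr : String) (seq : String) (out : List String × List Int × List (List Int)) : Decidable (Spec_get_ClstrCnt clstr seq out) := by unfold Spec_get_ClstrCnt; infer_instance

-- ===== CLAIM (what is proved, stated in full; the proofs are below) =====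
def Claim_equal_get_ClstrCnt : Prop := ∀ (clstr : String) (seq : String), Dom_get_ClstrCnt clstr seq → Spec_get_ClstrCnt clstr seq (get_ClstrCnt clstr seq)

-- ===== LEMMAS AND PROOFS =====

-- recursive form of B's greedy selection, for reasoning
def pvGRec (m : Int) : List Int → Int → List Int
  | [], _ => []
  | p :: ps, nxt => if nxt ≤ p then p :: pvGRec m ps (p + m) else pvGRec m ps nxt

-- occurrence positions of pat in sl from position i on
def pvOccFrom (sl pat : List Char) (i : Int) : List Int :=
  (PySem.List.pyRange i ((sl.length : Int) - (pat.length : Int) + 1)).filter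
    (fun j => PySem.List.slice sl (some j) (some (j + (pat.length : Int))) == pat)

theorem pvGreedy_foldl (m : Int) (l : List Int) : ∀ (acc : List Int) (nxt : Int),
    (l.foldl (fun (st : List Int × Int) p => if st.2 ≤ p then (st.1 ++ [p], p + m) else st)
      (acc, nxt)).1 = acc ++ pvGRec m l nxt := by
  induction l with
  | nil => intro acc nxt; simp [pvGRec]
  | cons p ps ih =>
    intro acc nxt
    simp only [List.foldl_cons, pvGRec]
    by_cases h : nxt ≤ p
    · simp only [if_pos h, ih]
      simp
    · simp only [if_neg h, ih]

theorem pvGreedy_eq (m : Int) (l : List Int) : pvGreedy m l = pvGRec m l 0 := by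
  unfold pvGreedy
  rw [pvGreedy_foldl]
  simp

theorem pvGRec_prefix_lt (m : Int) (pre : List Int) : ∀ (l : List Int) (nxt : Int),
    (∀ p ∈ pre, p < nxt) → pvGRec m (pre ++ l) nxt = pvGRec m l nxt := by
  induction pre with
  | nil => intro l nxt _; rfl
  | cons q qs ih =>
    intro l nxt h
    have hq : ¬ nxt ≤ q := by have := h q (by simp); omega
    simp only [List.cons_append, pvGRec, if_neg hq]
    exact ih l nxt (fun p hp => h p (by simp [hp]))

theorem pvGRec_all_lt (m : Int) (l : List Int) (nxt : Int) (h : ∀ p ∈ l, p < nxt) :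
    pvGRec m l nxt = [] := by
  have := pvGRec_prefix_lt m l [] nxt h
  simpa using this

theorem pvGRec_congr (m : Int) (l : List Int) : ∀ (a b : Int),
    (∀ p ∈ l, (a ≤ p ↔ b ≤ p)) → pvGRec m l a = pvGRec m l b := by
  induction l with
  | nil => intro a b _; rfl
  | cons p ps ih =>
    intro a b h
    by_cases ha : a ≤ p
    · have hb : b ≤ p := (h p (by simp)).mp ha
      simp only [pvGRec, if_pos ha, if_pos hb]
    · have hb : ¬ b ≤ p := fun hb => ha ((h p (by simp)).mpr hb)
      simp only [pvGRec, if_neg ha, if_neg hb]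
      exact ih a b (fun q hq => h q (by simp [hq]))

-- a match of pat at a valid position fits inside sl
theorem pvMatchBound (sl pat : List Char) (hm : 0 < pat.length) {i : Int} (h0 : 0 ≤ i)
    (hs : PySem.List.slice sl (some i) (some (i + (pat.length : Int))) = pat) :
    i + (pat.length : Int) ≤ (sl.length : Int) := by
  rw [PySem.List.slice_toNat sl h0 (by omega)] at hs
  have h := congrArg List.length hs
  rw [List.length_take, List.length_drop] at h
  omega

-- A's while loop computes the greedy selection over the occurrence list
theorem pvALoop_eq (sl pat : List Char) (hm : 0 < pat.length) :
    ∀ (fuel : Nat) (i cnt : Int) (idx : List Int), 0 ≤ i →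
    (((sl.length : Int) + 1 - i).toNat < fuel) →
    pvALoop sl pat fuel i cnt idx =
      (cnt + ((pvGRec (pat.length : Int) (pvOccFrom sl pat i) i).length : Int),
       idx ++ pvGRec (pat.length : Int) (pvOccFrom sl pat i) i) := by
  intro fuel
  induction fuel with
  | zero => intro i cnt idx _ hf; omega
  | succ f ih =>
    intro i cnt idx h0 hf
    by_cases hni : (sl.length : Int) < i
    · have hnil : pvOccFrom sl pat i = [] := by
        unfold pvOccFrom
        rw [PySem.List.pyRange_one_eq_nil (by omega)]
        rfl
      simp [pvALoop, if_pos hni, hnil, pvGRec]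
    · simp only [not_lt] at hni
      by_cases hmatch : PySem.List.slice sl (some i) (some (i + (pat.length : Int))) = pat
      · have hb : i + (pat.length : Int) ≤ (sl.length : Int) := pvMatchBound sl pat hm h0 hmatch
        have hcons : pvOccFrom sl pat i = i :: pvOccFrom sl pat (i + 1) := by
          unfold pvOccFrom
          rw [PySem.List.pyRange_one_cons (by omega), List.filter_cons]
          simp [hmatch]
        have hshift : pvGRec (pat.length : Int) (pvOccFrom sl pat (i + 1)) (i + (pat.length : Int))
            = pvGRec (pat.length : Int) (pvOccFrom sl pat (i + (pat.length : Int))) (i + (pat.length : Int)) := by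
          by_cases hc : i + (pat.length : Int) ≤ (sl.length : Int) - (pat.length : Int) + 1
          · unfold pvOccFrom
            rw [PySem.List.pyRange_one_append (i+1) (i + (pat.length : Int)) _ (by omega) hc,
                List.filter_append]
            apply pvGRec_prefix_lt
            intro p hp
            have := List.mem_filter.mp hp
            have := PySem.List.mem_pyRange_one.mp this.1
            omega
          · have h1 : pvOccFrom sl pat (i + (pat.length : Int)) = [] := by
              unfold pvOccFrom
              rw [PySem.List.pyRange_one_eq_nil (by omega)]
              rfl
            rw [h1]
            rw [pvGRec_all_lt, pvGRec]
            intro p hp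
            unfold pvOccFrom at hp
            have := List.mem_filter.mp hp
            have := PySem.List.mem_pyRange_one.mp this.1
            omega
        have hstep : pvALoop sl pat (f+1) i cnt idx
            = pvALoop sl pat f (i + (pat.length : Int)) (cnt + 1) (idx ++ [i]) := by
          simp [pvALoop, if_neg (by omega : ¬ (sl.length : Int) < i), hmatch]
        rw [hstep, ih _ _ _ (by omega) (by omega)]
        rw [hcons]
        simp only [pvGRec, if_pos (le_refl i), hshift]
        simp only [Prod.mk.injEq]
        constructor
        · simp only [List.length_cons]
          push_cast
          ring
        · simp
      · have hocc : pvOccFrom sl pat i = pvOccFrom sl pat (i + 1) := by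
          by_cases hc : i < (sl.length : Int) - (pat.length : Int) + 1
          · unfold pvOccFrom
            rw [PySem.List.pyRange_one_cons hc, List.filter_cons]
            simp [hmatch]
          · unfold pvOccFrom
            rw [PySem.List.pyRange_one_eq_nil (by omega), PySem.List.pyRange_one_eq_nil (by omega)]
        have hstep : pvALoop sl pat (f+1) i cnt idx = pvALoop sl pat f (i + 1) cnt idx := by
          simp [pvALoop, if_neg (by omega : ¬ (sl.length : Int) < i), hmatch]
        rw [hstep, ih _ _ _ (by omega) (by omega), hocc]
        have : pvGRec (pat.length : Int) (pvOccFrom sl pat (i+1)) (i+1)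
            = pvGRec (pat.length : Int) (pvOccFrom sl pat (i+1)) i := by
          apply pvGRec_congr
          intro p hp
          unfold pvOccFrom at hp
          have := List.mem_filter.mp hp
          have := PySem.List.mem_pyRange_one.mp this.1
          omega
        rw [this]

-- the base dict maps every key to []
theorem pvD0_getD (rots : List String) : ∀ (d : PySem.Dict (List Char) (List Int)),
    (∀ k, d.getD k [] = []) → ∀ k,
    (rots.foldl (fun d r => d.insert r.toList ([] : List Int)) d).getD k [] = [] := by
  induction rots with
  | nil => intro d h k; exact h k
  | cons a t ih =>
    intro d h k
    simp only [List.foldl_cons]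
    apply ih
    intro k'
    by_cases hk : k' = a.toList
    · subst hk; exact PySem.Dict.getD_insert_self ..
    · rw [PySem.Dict.getD_insert_of_ne _ _ _ hk]; exact h k'

theorem pvFold_contains_mono (rots : List String) : ∀ (d : PySem.Dict (List Char) (List Int)) (k : List Char),
    d.contains k = true →
    (rots.foldl (fun d r => d.insert r.toList ([] : List Int)) d).contains k = true := by
  induction rots with
  | nil => intro d k h; exact h
  | cons a t ih =>
    intro d k h
    simp only [List.foldl_cons]
    apply ih
    rw [PySem.Dict.contains_insert]
    simp [h]

theorem pvD0_contains (rots : List String) : ∀ (d : PySem.Dict (List Char) (List Int)) (r : String),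
    r ∈ rots →
    (rots.foldl (fun d r => d.insert r.toList ([] : List Int)) d).contains r.toList = true := by
  induction rots with
  | nil => intro d r h; simp at h
  | cons a t ih =>
    intro d r h
    simp only [List.foldl_cons]
    rcases List.mem_cons.mp h with h | h
    · subst h
      apply pvFold_contains_mono
      rw [PySem.Dict.contains_insert]
      simp
    · exact ih _ r h

-- the bucketing pass: the entry of a pre-existing key collects exactly its match positions
theorem pvOccFold_getD (sl : List Char) (m : Int) : ∀ (l : List Int)
    (d : PySem.Dict (List Char) (List Int)) (r : List Char), d.contains r = true →
    (l.foldl (fun d i =>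
        let w := PySem.List.slice sl (some i) (some (i + m))
        if d.contains w then d.modify w [] (fun v => v ++ [i]) else d) d).getD r []
      = d.getD r [] ++ l.filter (fun i => PySem.List.slice sl (some i) (some (i + m)) == r) := by
  intro l
  induction l with
  | nil => intro d r _; simp
  | cons i t ih =>
    intro d r hr
    simp only [List.foldl_cons, List.filter_cons]
    by_cases hw : d.contains (PySem.List.slice sl (some i) (some (i + m))) = true
    · simp only [hw, if_true]
      rw [ih _ r (by rw [PySem.Dict.contains_modify]; simp [hr])]
      rw [PySem.Dict.getD_modify]
      by_cases he : PySem.List.slice sl (some i) (some (i + m)) = r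
      · rw [if_pos he.symm]
        simp [he]
      · rw [if_neg (fun h => he h.symm)]
        have hbe : (PySem.List.slice sl (some i) (some (i + m)) == r) = false := by
          simp [he]
        simp [hbe]
    · simp only [Bool.not_eq_true] at hw
      simp only [hw, Bool.false_eq_true, if_false]
      have hne : ¬ (PySem.List.slice sl (some i) (some (i + m)) = r) := by
        intro h; rw [h] at hw; rw [hw] at hr; exact Bool.false_ne_true hr
      rw [ih _ r hr]
      simp [hne]

-- a rotation has the length of clstr, which is positive when rotations exist
theorem pvRots_mem (clstr : String) (ic : String) (h : ic ∈ pvRotsA clstr) :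
    ic.toList.length = clstr.toList.length ∧ 0 < clstr.toList.length := by
  unfold pvRotsA at h
  rw [PySem.List.mem_sorted] at h
  rcases List.mem_map.mp h with ⟨i, hi, rfl⟩
  have hb := PySem.List.mem_pyRange_one.mp hi
  rw [PySem.List.slice_from _ hb.1, PySem.List.slice_to _ hb.1]
  constructor
  · simp [List.length_drop, List.length_take]
    omega
  · omega

-- ===== VERDICT (by name: the statement is the Claim_ definition above) =====
theorem get_ClstrCnt_spec : Claim_equal_get_ClstrCnt := by
  intro clstr seq _
  unfold Spec_get_ClstrCnt get_ClstrCnt get_ClstrCnt_alt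
  simp only []
  have hrot : pvRotsB clstr = pvRotsA clstr := rfl
  rw [hrot]
  have hfold : (pvRotsA clstr).foldl (fun (st : List Int × List (List Int)) ic =>
      let r := pvALoop seq.toList ic.toList (seq.toList.length + 2) 0 0 []
      (st.1 ++ [r.1], st.2 ++ [r.2])) ([], [])
    = (pvRotsA clstr).foldl (fun (st : List Int × List (List Int)) r =>
      let picked := pvGreedy (clstr.toList.length : Int)
        ((pvOccDict seq.toList (clstr.toList.length : Int) (pvRotsA clstr)).getD r.toList [])
      (st.1 ++ [(picked.length : Int)], st.2 ++ [picked])) ([], []) := by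
    apply PySem.List.foldl_congr_mem
    intro acc ic hic
    have ⟨hlen, hpos⟩ := pvRots_mem clstr ic hic
    have hm : 0 < ic.toList.length := by omega
    -- the dict entry for ic is its occurrence list
    have hocc : (pvOccDict seq.toList (clstr.toList.length : Int) (pvRotsA clstr)).getD ic.toList []
        = pvOccFrom seq.toList ic.toList 0 := by
      unfold pvOccDict
      simp only []
      rw [pvOccFold_getD seq.toList _ _ _ ic.toList (pvD0_contains _ _ _ hic)]
      rw [pvD0_getD _ _ (fun k => rfl)]
      unfold pvOccFrom
      rw [hlen]
      simp
    have hloop := pvALoop_eq seq.toList ic.toList hm (seq.toList.length + 2) 0 0 [] (le_refl 0)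
      (by omega)
    simp only []
    rw [hloop, hocc, pvGreedy_eq]
    rw [hlen]
    simp
  rw [hfold]
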